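-- pv_equiv track=rewrite | github.com/xixuanzhang2022/diffFFF | cascade_builder.py | get_order_saw
-- ===== SOURCE A (Python) =====
-- def intersection_ordered(a, b):
--     """Ordered intersection: keep elements in `a` that are in `b`, preserving `a`'s order."""
--     return [x for x in a if x in b]
--
-- def get_order_saw(earlybirds, following, ref_id):
--     """
--     For each user: intersect their following with earlybird exposure list.
--     If ref_id appears in list, and was followed later than someone else, trim the list.
--     """
--     order_po = [intersection_ordered(eb, f) for eb, f in zip(earlybirds, following)]
--     order_saw = []
--     for i in range(len(order_po)):
--         saw_list = order_po[i]
--         if ref_id in saw_list: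
--             sep = saw_list.index(ref_id)
--             saw_list = saw_list[sep + 1:]  # only what was seen after ref
--         order_saw.append(saw_list)
--     return order_po, order_saw
-- ===== SOURCE B (Python) =====
-- def get_order_saw(earlybirds, following, ref_id):
--     """Single fused pass per user: build a set of `following`, then walk the earlybird list
--     once, collecting the intersection and (via a seen-flag) the suffix after the
--     first ref_id simultaneously."""
--     order_po = []
--     order_saw = []
--     for eb, f in zip(earlybirds, following):
--         fset = set(f)
--         po = []
--         saw = []
--         seen = False
--         for x in eb:
--             if x in fset:
--                 po.append(x)
--                 if seen:
--                     saw.append(x)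
--                 elif x == ref_id:
--                     seen = True
--         order_po.append(po)
--         order_saw.append(saw if seen else po)
--     return order_po, order_saw
-- ===== Notes on version B (the rewrite author's own statement) =====
-- stated objective: alternative
-- what changed: Replaces the two-phase pipeline (build all intersections via a nested 'x in list' scan, then a second indexed loop doing 'in'/'.index'/slice per list) by one fused pass per user over the earlybird list with set membership and a seen-flag that collects the post-ref suffix as intersections are found; it trades A's repeated list scans for a precomputed set and a single traversal.
import Mathlib
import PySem

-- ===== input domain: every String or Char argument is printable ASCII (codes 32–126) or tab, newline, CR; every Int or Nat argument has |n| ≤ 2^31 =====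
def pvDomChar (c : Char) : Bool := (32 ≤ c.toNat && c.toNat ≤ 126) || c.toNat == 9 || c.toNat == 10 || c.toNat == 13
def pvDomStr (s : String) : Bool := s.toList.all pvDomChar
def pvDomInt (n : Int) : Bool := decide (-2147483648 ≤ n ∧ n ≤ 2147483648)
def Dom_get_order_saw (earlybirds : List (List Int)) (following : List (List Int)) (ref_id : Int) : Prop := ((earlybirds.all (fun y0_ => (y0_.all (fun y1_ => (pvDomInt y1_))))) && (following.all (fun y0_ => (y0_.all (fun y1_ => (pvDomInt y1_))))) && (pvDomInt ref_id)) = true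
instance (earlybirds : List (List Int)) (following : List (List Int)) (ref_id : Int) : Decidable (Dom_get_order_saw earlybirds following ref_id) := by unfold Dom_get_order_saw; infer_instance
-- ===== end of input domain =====

-- B fuses A's two phases into one pass per user (set membership + seen-flag); proved equal to A on all inputs.


-- ===== PORT A =====
def intersection_ordered (a b : List Int) : List Int :=
  a.filter (fun x => b.contains x)

def get_order_saw (earlybirds : List (List Int)) (following : List (List Int)) (ref_id : Int) : List (List Int) × List (List Int) :=
  let order_po := (earlybirds.zip following).map (fun p => intersection_ordered p.1 p.2)
  let order_saw := (PySem.List.pyRange 0 (order_po.length : Int) 1).foldl (fun order_saw i =>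
      let saw_list := PySem.List.pyGetD order_po i []
      let saw_list :=
        if saw_list.contains ref_id then
          match PySem.List.index? saw_list ref_id with
          | some sep => PySem.List.slice saw_list (some ((sep : Int) + 1)) none
          | none => saw_list   -- unreachable: guarded by the contains test (Python .index raises only when absent)
        else saw_list
      order_saw ++ [saw_list]) []
  (order_po, order_saw)

-- ===== PORT B =====
-- the fused inner loop of Source B: state (po, saw, seen)
def pvPass (ref_id : Int) (fset : PySem.Set Int) (eb : List Int) : List Int × List Int × Bool :=
  eb.foldl (fun st x =>
      if fset.contains x then
        (st.1 ++ [x],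
         if st.2.2 then st.2.1 ++ [x] else st.2.1,
         st.2.2 || (x == ref_id))
      else st)
    ([], [], false)

def get_order_saw_alt (earlybirds : List (List Int)) (following : List (List Int)) (ref_id : Int) : List (List Int) × List (List Int) :=
  (earlybirds.zip following).foldl (fun acc p =>
      let r := pvPass ref_id (PySem.Set.ofList p.2) p.1
      (acc.1 ++ [r.1], acc.2 ++ [if r.2.2 then r.2.1 else r.1]))
    ([], [])

-- ===== PRECONDITION & SPEC =====
def Spec_get_order_saw (earlybirds : List (List Int)) (following : List (List Int)) (ref_id : Int) (out : List (List Int) × List (List Int)) : Prop := out = get_order_saw_alt earlybirds following ref_id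
instance (earlybirds : List (List Int)) (following : List (List Int)) (ref_id : Int) (out : List (List Int) × List (List Int)) : Decidable (Spec_get_order_saw earlybirds following ref_id out) := by unfold Spec_get_order_saw; infer_instance

-- ===== CLAIM (what is proved, stated in full; the proofs are below) =====
def Claim_equal_get_order_saw : Prop := ∀ (earlybirds : List (List Int)) (following : List (List Int)) (ref_id : Int), Dom_get_order_saw earlybirds following ref_id → Spec_get_order_saw earlybirds following ref_id (get_order_saw earlybirds following ref_id)

-- ===== LEMMAS AND PROOFS =====

-- the suffix after the first occurrence of r ([] if r absent)
def pvAfter (r : Int) : List Int → List Int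
  | [] => []
  | x :: xs => if x = r then xs else pvAfter r xs

-- pvPass's step once seen = true: both lists just collect the filtered elements
theorem pvPass_seen_true (r : Int) (s : PySem.Set Int) (eb po saw : List Int) :
    eb.foldl (fun st x =>
      if s.contains x then
        (st.1 ++ [x], if st.2.2 then st.2.1 ++ [x] else st.2.1, st.2.2 || (x == r))
      else st) (po, saw, true)
    = (po ++ eb.filter (fun x => s.contains x), saw ++ eb.filter (fun x => s.contains x), true) := by
  induction eb generalizing po saw with
  | nil => simp
  | cons x xs ih =>
    simp only [List.foldl_cons]
    by_cases hx : s.contains x = true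
    · rw [if_pos hx]
      simp only [if_true, Bool.true_or]
      rw [ih, List.filter_cons_of_pos hx]
      simp only [List.append_assoc, List.singleton_append]
    · rw [if_neg hx, ih, List.filter_cons_of_neg hx]

-- pvPass's characterisation starting from seen = false
theorem pvPass_seen_false (r : Int) (s : PySem.Set Int) (eb po saw : List Int) :
    eb.foldl (fun st x =>
      if s.contains x then
        (st.1 ++ [x], if st.2.2 then st.2.1 ++ [x] else st.2.1, st.2.2 || (x == r))
      else st) (po, saw, false)
    = (po ++ eb.filter (fun x => s.contains x),
       saw ++ pvAfter r (eb.filter (fun x => s.contains x)),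
       (eb.filter (fun x => s.contains x)).contains r) := by
  induction eb generalizing po saw with
  | nil => simp [pvAfter]
  | cons x xs ih =>
    simp only [List.foldl_cons]
    by_cases hx : s.contains x = true
    · rw [if_pos hx]
      simp only [Bool.false_eq_true, if_false, Bool.false_or]
      by_cases hr : x = r
      · subst hr
        simp only [beq_self_eq_true]
        rw [pvPass_seen_true, List.filter_cons_of_pos hx]
        simp only [pvAfter, if_true, List.contains_cons, beq_self_eq_true, Bool.true_or,
          List.append_assoc, List.singleton_append]
      · have hb : (x == r) = false := by simp [hr]
        simp only [hb]
        rw [ih, List.filter_cons_of_pos hx]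
        have hb2 : (r == x) = false := by simp [Ne.symm hr]
        simp only [pvAfter, if_neg hr, List.contains_cons, hb2, Bool.false_or,
          List.append_assoc, List.singleton_append]
    · rw [if_neg hx, ih, List.filter_cons_of_neg hx]

-- A's trim step equals pvAfter when r occurs in the list
theorem pvTrim_eq_after (r : Int) (l : List Int) (h : l.contains r = true) :
    (match PySem.List.index? l r with
     | some sep => PySem.List.slice l (some ((sep : Int) + 1)) none
     | none => l) = pvAfter r l := by
  induction l with
  | nil => simp at h
  | cons x xs ih =>
    by_cases hr : x = r
    · subst hr
      rw [PySem.List.index?_cons_self]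
      simp only [pvAfter, if_true]
      show PySem.List.slice (x :: xs) (some (((0 : Nat) : Int) + 1)) none = xs
      rw [show (((0 : Nat) : Int) + 1 : Int) = ((1 : Nat) : Int) by norm_num,
        PySem.List.slice_from_natCast]
      simp
    · have hx : xs.contains r = true := by
        simp only [List.contains_cons] at h
        rcases Bool.or_eq_true_iff.mp h with h1 | h2
        · exact absurd ((beq_iff_eq.mp h1).symm) hr
        · exact h2
      rw [PySem.List.index?_cons_of_ne xs hr]
      rcases Option.isSome_iff_exists.mp ((PySem.List.index?_isSome_iff xs r).mpr (by simpa using hx)) with ⟨n, hn⟩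
      rw [hn]
      simp only [Option.map_some]
      have ihx := ih hx
      rw [hn] at ihx
      simp only [pvAfter, if_neg hr]
      rw [← ihx]
      show PySem.List.slice (x :: xs) (some (((n + 1 : Nat) : Int) + 1)) none
        = PySem.List.slice xs (some (((n : Nat) : Int) + 1)) none
      rw [show (((n + 1 : Nat) : Int) + 1 : Int) = ((n + 2 : Nat) : Int) by push_cast; ring,
        show (((n : Nat) : Int) + 1 : Int) = ((n + 1 : Nat) : Int) by push_cast; ring,
        PySem.List.slice_from_natCast, PySem.List.slice_from_natCast]
      simp [List.drop]

-- membership in Set.ofList f matches membership in f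
theorem pvFilter_ofList (f l : List Int) :
    l.filter (fun x => (PySem.Set.ofList f).contains x) = l.filter (fun x => f.contains x) := by
  apply List.filter_congr
  intro x _
  simp [PySem.Set.mem_ofList]

-- per-user first component of B's fused pass = A's intersection
theorem pvUser_fst (r : Int) (eb f : List Int) :
    (pvPass r (PySem.Set.ofList f) eb).1 = intersection_ordered eb f := by
  unfold pvPass
  rw [pvPass_seen_false]
  simp only [List.nil_append]
  rw [pvFilter_ofList]
  rfl

-- per-user second component of B = A's trimmed list
theorem pvUser_snd (r : Int) (eb f : List Int) :
    (if (pvPass r (PySem.Set.ofList f) eb).2.2 then (pvPass r (PySem.Set.ofList f) eb).2.1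
     else (pvPass r (PySem.Set.ofList f) eb).1)
    = (if (intersection_ordered eb f).contains r = true then
         match PySem.List.index? (intersection_ordered eb f) r with
         | some sep => PySem.List.slice (intersection_ordered eb f) (some ((sep : Int) + 1)) none
         | none => intersection_ordered eb f
       else intersection_ordered eb f) := by
  unfold pvPass
  rw [pvPass_seen_false]
  simp only [List.nil_append]
  rw [pvFilter_ofList]
  simp only [intersection_ordered]
  by_cases h : (eb.filter (fun x => f.contains x)).contains r = true
  · rw [if_pos h, if_pos h, ← pvTrim_eq_after r _ h]
  · rw [if_neg h, if_neg h]

-- ===== VERDICT (by name: the statement is the Claim_ definition above) =====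
theorem get_order_saw_spec : Claim_equal_get_order_saw := by
  intro earlybirds following ref_id _
  unfold Spec_get_order_saw get_order_saw get_order_saw_alt
  simp only []
  -- A's range loop over order_po is a fold over order_po itself …
  rw [PySem.List.foldl_pyRange_pyGetD'
        (xs := (earlybirds.zip following).map (fun p => intersection_ordered p.1 p.2))
        (d := ([] : List Int))
        (f := fun acc (l : List Int) => acc ++
          [if l.contains ref_id = true then
             match PySem.List.index? l ref_id with
             | some sep => PySem.List.slice l (some ((sep : Int) + 1)) none
             | none => l
           else l])
        (init := ([] : List (List Int))) (by norm_num)]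
  simp only [Int.toNat_zero, List.drop_zero]
  -- … which is a map (each iteration appends one element)
  rw [PySem.List.foldl_append_singleton_eq_map, List.map_map]
  -- B's fold with two independent accumulators is two append-folds, i.e. two maps
  rw [PySem.List.foldl_prod_mk
        (f := fun acc (p : List Int × List Int) =>
          acc ++ [(pvPass ref_id (PySem.Set.ofList p.2) p.1).1])
        (g := fun acc (p : List Int × List Int) =>
          acc ++ [if (pvPass ref_id (PySem.Set.ofList p.2) p.1).2.2 then
                    (pvPass ref_id (PySem.Set.ofList p.2) p.1).2.1
                  else (pvPass ref_id (PySem.Set.ofList p.2) p.1).1])]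
  rw [PySem.List.foldl_append_singleton_eq_map, PySem.List.foldl_append_singleton_eq_map]
  simp only [List.nil_append]
  -- compare the two maps pointwise per user
  refine Prod.ext ?_ ?_
  · exact (List.map_congr_left (fun p _ => (pvUser_fst ref_id p.1 p.2).symm))
  · exact (List.map_congr_left (fun p _ => by
      simpa using (pvUser_snd ref_id p.1 p.2).symm))
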